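-- pv_equiv track=rewrite | github.com/xpessoles/Informatique | Exercices/S2_08_ParcoursGraphe/05_Labyrinthe/05_Labyrinthe.py | creer_graphe
-- ===== SOURCE A (Python) =====
-- def creer_graphe(p:int, n:int) -> dict:
--     # n : lignes
--     # p : colonnes
--     G = {}
--     sommets = []
--     for i in range(n):
--         for j in range(p):
--             sommets.append((j,i))
--
--     for sommet in sommets :
--         (i,j) = sommet
--         voisins = [(i+1,j),(i,j+1),(i-1,j),(i,j-1)]
--         # On vérifie que les voisins sont dans les sommets
--         vv = []
--         for v in voisins :
--             if v in sommets :
--                 vv.append(v)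
--         G[sommet]=vv
--     return G
-- ===== SOURCE B (Python) =====
-- def creer_graphe(p: int, n: int) -> dict:
--     # Build all adjacency lists incrementally by four directional sweeps over
--     # truncated index ranges: no candidate lists and no membership tests at all.
--     # Per vertex the sweeps append right, down, left, up - the same order in
--     # which A's filter keeps them.
--     G = {(j, i): [] for i in range(n) for j in range(p)}
--     for i in range(n):             # right neighbours
--         for j in range(p - 1):
--             G[(j, i)].append((j + 1, i))
--     for i in range(n - 1):         # neighbours in next row
--         for j in range(p):
--             G[(j, i)].append((j, i + 1))
--     for i in range(n):             # left neighbours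
--         for j in range(1, p):
--             G[(j, i)].append((j - 1, i))
--     for i in range(1, n):          # neighbours in previous row
--         for j in range(p):
--             G[(j, i)].append((j, i - 1))
--     return G
-- ===== Notes on version B (the rewrite author's own statement) =====
-- stated objective: faster
-- what changed: B builds every adjacency list incrementally by four directional sweeps over truncated index ranges (appending the right/down/left/up neighbour per sweep), instead of A's per-vertex candidate list filtered by a linear membership scan of the full vertex list.
import Mathlib
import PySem

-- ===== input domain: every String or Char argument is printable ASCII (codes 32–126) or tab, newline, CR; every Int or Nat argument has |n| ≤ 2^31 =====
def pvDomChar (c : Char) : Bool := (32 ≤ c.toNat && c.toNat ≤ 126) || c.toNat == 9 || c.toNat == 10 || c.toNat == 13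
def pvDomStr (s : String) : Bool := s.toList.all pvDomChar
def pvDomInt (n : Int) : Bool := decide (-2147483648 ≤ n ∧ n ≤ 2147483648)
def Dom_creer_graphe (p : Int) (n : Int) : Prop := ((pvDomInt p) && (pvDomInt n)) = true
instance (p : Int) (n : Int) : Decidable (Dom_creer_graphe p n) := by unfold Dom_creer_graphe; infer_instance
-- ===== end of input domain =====

-- B replaces A's per-vertex candidate list filtered by a linear membership scan of the
-- full vertex list with four directional sweeps over truncated index ranges that build
-- each adjacency list incrementally (objective: faster).

-- ===== PORT A =====
-- dict entries ((j,i), vv) are re-associated to (j, i, vv) to meet the required flat signature.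
def creer_graphe (p : Int) (n : Int) : List (Int × Int × List (Int × Int)) :=
  let sommets : List (Int × Int) :=
    (PySem.List.pyRange 0 n 1).foldl (fun acc i =>
      (PySem.List.pyRange 0 p 1).foldl (fun acc j => acc ++ [(j, i)]) acc) []
  let G : PySem.Dict (Int × Int) (List (Int × Int)) :=
    sommets.foldl (fun G s =>
      let i := s.1
      let j := s.2
      let voisins : List (Int × Int) := [(i+1, j), (i, j+1), (i-1, j), (i, j-1)]
      let vv := voisins.foldl (fun vv v => if sommets.contains v then vv ++ [v] else vv) []
      G.insert s vv) PySem.Dict.empty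
  G.items.map (fun kv => (kv.1.1, kv.1.2, kv.2))

-- ===== PORT B =====
-- G[(j,i)].append(x) is ported as Dict.modify (j,i) [] (· ++ [x]): exact here, since every
-- key a sweep touches was inserted by the initial comprehension.
def creer_graphe_alt (p : Int) (n : Int) : List (Int × Int × List (Int × Int)) :=
  let G0 : PySem.Dict (Int × Int) (List (Int × Int)) :=
    (PySem.List.pyRange 0 n 1).foldl (fun G i =>
      (PySem.List.pyRange 0 p 1).foldl (fun G j => G.insert (j, i) []) G) PySem.Dict.empty
  let G1 :=
    (PySem.List.pyRange 0 n 1).foldl (fun G i =>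
      (PySem.List.pyRange 0 (p-1) 1).foldl (fun G j =>
        G.modify (j, i) [] (· ++ [(j+1, i)])) G) G0
  let G2 :=
    (PySem.List.pyRange 0 (n-1) 1).foldl (fun G i =>
      (PySem.List.pyRange 0 p 1).foldl (fun G j =>
        G.modify (j, i) [] (· ++ [(j, i+1)])) G) G1
  let G3 :=
    (PySem.List.pyRange 0 n 1).foldl (fun G i =>
      (PySem.List.pyRange 1 p 1).foldl (fun G j =>
        G.modify (j, i) [] (· ++ [(j-1, i)])) G) G2
  let G4 :=
    (PySem.List.pyRange 1 n 1).foldl (fun G i =>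
      (PySem.List.pyRange 0 p 1).foldl (fun G j =>
        G.modify (j, i) [] (· ++ [(j, i-1)])) G) G3
  G4.items.map (fun kv => (kv.1.1, kv.1.2, kv.2))

-- ===== PRECONDITION & SPEC =====
def Spec_creer_graphe (p : Int) (n : Int) (out : List (Int × Int × List (Int × Int))) : Prop := out = creer_graphe_alt p n
instance (p : Int) (n : Int) (out : List (Int × Int × List (Int × Int))) : Decidable (Spec_creer_graphe p n out) := by unfold Spec_creer_graphe; infer_instance

-- ===== CLAIM (what is proved, stated in full; the proofs are below) =====
def Claim_equal_creer_graphe : Prop := ∀ (p : Int) (n : Int), Dom_creer_graphe p n → Spec_creer_graphe p n (creer_graphe p n)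

-- ===== LEMMAS AND PROOFS =====

-- The rectangle of grid vertices (j, i) with a ≤ j < b, c ≤ i < d, in row-major order.
def pvGrid (a b c d : Int) : List (Int × Int) :=
  (PySem.List.pyRange c d 1).flatMap (fun i => (PySem.List.pyRange a b 1).map (fun j => (j, i)))

theorem mem_pvGrid (a b c d : Int) (v : Int × Int) :
    v ∈ pvGrid a b c d ↔ a ≤ v.1 ∧ v.1 < b ∧ c ≤ v.2 ∧ v.2 < d := by
  rcases v with ⟨x, y⟩
  simp only [pvGrid, List.mem_flatMap, List.mem_map, PySem.List.mem_pyRange_one, Prod.mk.injEq]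
  constructor
  · rintro ⟨i, hi, j, hj, rfl, rfl⟩; exact ⟨hj.1, hj.2, hi.1, hi.2⟩
  · rintro ⟨h1, h2, h3, h4⟩; exact ⟨y, ⟨h3, h4⟩, x, ⟨h1, h2⟩, rfl, rfl⟩

theorem nodup_pvGrid (a b c d : Int) : (pvGrid a b c d).Nodup := by
  apply List.nodup_flatMap.2
  refine ⟨fun i _ => ?_, ?_⟩
  · exact List.Nodup.map (fun j j' h => by simpa using congrArg Prod.fst h)
      (PySem.List.nodup_pyRange_one a b)
  · refine (PySem.List.nodup_pyRange_one c d).pairwise_of_forall_ne (fun i _ i' _ hne => ?_)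
    simp only [List.Disjoint, List.mem_map]
    rintro v ⟨j, _, rfl⟩ ⟨j', _, h⟩
    exact hne (congrArg Prod.snd h).symm

theorem contains_pvGrid (a b c d : Int) (v : Int × Int) :
    (pvGrid a b c d).contains v
      = (decide (a ≤ v.1) && decide (v.1 < b) && decide (c ≤ v.2) && decide (v.2 < d)) := by
  rw [Bool.eq_iff_iff]
  simp [mem_pvGrid, and_assoc]

-- A's hand-built vertex list is pvGrid 0 p 0 n.
theorem sommets_eq (p n : Int) :
    ((PySem.List.pyRange 0 n 1).foldl (fun acc i =>
      (PySem.List.pyRange 0 p 1).foldl (fun acc j => acc ++ [(j, i)]) acc) ([] : List (Int × Int)))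
    = pvGrid 0 p 0 n := by
  simp only [PySem.List.foldl_append_singleton_eq_map]
  rw [PySem.List.foldl_append_eq_flatMap, List.nil_append, pvGrid]

theorem set_add_of_mem {α : Type} [BEq α] [LawfulBEq α] (s : List α) (x : α) (h : x ∈ s) :
    PySem.Set.add s x = s := by
  simp [PySem.Set.add, PySem.Set.contains, h]

theorem set_update_of_subset {α : Type} [BEq α] [LawfulBEq α] (l s : List α)
    (h : ∀ x ∈ l, x ∈ s) : PySem.Set.update s l = s := by
  induction l generalizing s with
  | nil => rfl
  | cons x l ih =>
      have hx : PySem.Set.add s x = s := set_add_of_mem s x (h x (by simp))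
      show PySem.Set.update (PySem.Set.add s x) l = s
      rw [hx]; exact ih s (fun y hy => h y (by simp [hy]))

theorem filter_map_pair {α β : Type} [BEq α] [LawfulBEq α] (L : List α) (g : α → β) (c : α)
    (h : L.Nodup) :
    ((L.map (fun k => (k, g k))).filter (fun q => q.1 == c)).map (fun q => q.2)
      = if c ∈ L then [g c] else [] := by
  induction L with
  | nil => simp
  | cons x L ih =>
      simp only [List.nodup_cons] at h
      by_cases hx : x = c
      · subst hx
        have : x ∉ L := h.1
        simp [ih h.2, this]
      · have hbc : (x == c) = false := by simp [hx]
        simp only [List.map_cons, List.filter_cons, hbc, Bool.false_eq_true, if_false, ih h.2]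
        by_cases hc : c ∈ L
        · simp [List.mem_cons, hc]
        · simp [List.mem_cons, hc, Ne.symm hx]

-- One directional sweep appends g c to the entry of each key actually swept.
theorem sweep_getD (L : List (Int × Int)) (g : Int × Int → Int × Int)
    (d : PySem.Dict (Int × Int) (List (Int × Int))) (c : Int × Int) (hL : L.Nodup) :
    (L.foldl (fun d k => d.modify k [] (· ++ [g k])) d).getD c []
      = d.getD c [] ++ (if c ∈ L then [g c] else []) := by
  have h1 : (L.foldl (fun d k => d.modify k [] (· ++ [g k])) d)
      = ((L.map (fun k => (k, g k))).foldl (fun d q => d.modify q.1 [] (· ++ [q.2])) d) := by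
    rw [List.foldl_map]
  rw [h1, PySem.Dict.getD_foldl_modify_append, filter_map_pair L g c hL]

-- A sweep over keys of the dict does not change the key list.
theorem sweep_keys (L : List (Int × Int)) (g : Int × Int → Int × Int)
    (d : PySem.Dict (Int × Int) (List (Int × Int))) (hL : ∀ x ∈ L, x ∈ d.keys) :
    (L.foldl (fun d k => d.modify k [] (· ++ [g k])) d).keys = d.keys := by
  rw [PySem.Dict.keys_foldl_modify]
  exact set_update_of_subset L d.keys hL

-- nested row/column loops = one fold over the rectangle (modify form)
theorem sweep_flatten (a b c d : Int) (f1 f2 : Int → Int → Int)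
    (G : PySem.Dict (Int × Int) (List (Int × Int))) :
    ((PySem.List.pyRange c d 1).foldl (fun G i =>
        (PySem.List.pyRange a b 1).foldl (fun G j =>
          G.modify (j, i) [] (· ++ [(f1 j i, f2 j i)])) G) G)
      = (pvGrid a b c d).foldl (fun G k => G.modify k [] (· ++ [(f1 k.1 k.2, f2 k.1 k.2)])) G := by
  rw [pvGrid, List.foldl_flatMap]
  simp only [List.foldl_map]

-- nested row/column loops = one fold over the rectangle (insert form)
theorem init_flatten (a b c d : Int) (G : PySem.Dict (Int × Int) (List (Int × Int))) :
    ((PySem.List.pyRange c d 1).foldl (fun G i =>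
        (PySem.List.pyRange a b 1).foldl (fun G j => G.insert (j, i) []) G) G)
      = (pvGrid a b c d).foldl (fun G k => G.insert k []) G := by
  rw [pvGrid, List.foldl_flatMap]
  simp only [List.foldl_map]

-- A's filtered candidate list, written as the concatenation B's four sweeps produce.
theorem vv_eq (p n j i : Int) (h0j : 0 ≤ j) (hjp : j < p) (h0i : 0 ≤ i) (hin : i < n) :
    (([(j+1, i), (j, i+1), (j-1, i), (j, i-1)] : List (Int × Int)).foldl
        (fun vv v => if (pvGrid 0 p 0 n).contains v then vv ++ [v] else vv) [])
      = (if (j, i) ∈ pvGrid 0 (p-1) 0 n then [((j+1 : Int), i)] else [])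
          ++ (if (j, i) ∈ pvGrid 0 p 0 (n-1) then [((j : Int), i+1)] else [])
          ++ (if (j, i) ∈ pvGrid 1 p 0 n then [((j-1 : Int), i)] else [])
          ++ (if (j, i) ∈ pvGrid 0 p 1 n then [((j : Int), i-1)] else []) := by
  rw [PySem.List.foldl_append_if_eq_filter]
  have e1 : ((pvGrid 0 p 0 n).contains (j+1, i)) = decide ((j, i) ∈ pvGrid 0 (p-1) 0 n) := by
    rw [Bool.eq_iff_iff]
    simp only [contains_pvGrid, mem_pvGrid, Bool.and_eq_true, decide_eq_true_eq]
    omega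
  have e2 : ((pvGrid 0 p 0 n).contains (j, i+1)) = decide ((j, i) ∈ pvGrid 0 p 0 (n-1)) := by
    rw [Bool.eq_iff_iff]
    simp only [contains_pvGrid, mem_pvGrid, Bool.and_eq_true, decide_eq_true_eq]
    omega
  have e3 : ((pvGrid 0 p 0 n).contains (j-1, i)) = decide ((j, i) ∈ pvGrid 1 p 0 n) := by
    rw [Bool.eq_iff_iff]
    simp only [contains_pvGrid, mem_pvGrid, Bool.and_eq_true, decide_eq_true_eq]
    omega
  have e4 : ((pvGrid 0 p 0 n).contains (j, i-1)) = decide ((j, i) ∈ pvGrid 0 p 1 n) := by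
    rw [Bool.eq_iff_iff]
    simp only [contains_pvGrid, mem_pvGrid, Bool.and_eq_true, decide_eq_true_eq]
    omega
  simp only [List.nil_append, List.filter_cons, List.filter_nil, e1, e2, e3, e4,
    decide_eq_true_eq]
  by_cases h1 : (j, i) ∈ pvGrid 0 (p-1) 0 n <;> by_cases h2 : (j, i) ∈ pvGrid 0 p 0 (n-1) <;>
    by_cases h3 : (j, i) ∈ pvGrid 1 p 0 n <;> by_cases h4 : (j, i) ∈ pvGrid 0 p 1 n <;>
    simp [h1, h2, h3, h4]

-- ===== VERDICT (by name: the statement is the Claim_ definition above) =====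
theorem creer_graphe_spec : Claim_equal_creer_graphe := by
  intro p n _
  show creer_graphe p n = creer_graphe_alt p n
  simp only [creer_graphe, creer_graphe_alt, sommets_eq, sweep_flatten, init_flatten]
  have hS : (pvGrid 0 p 0 n).Nodup := nodup_pvGrid 0 p 0 n
  -- A's items
  have hA : ((pvGrid 0 p 0 n).foldl (fun G s =>
      G.insert s (([( s.1+1, s.2), (s.1, s.2+1), (s.1-1, s.2), (s.1, s.2-1)] : List (Int × Int)).foldl
        (fun vv v => if (pvGrid 0 p 0 n).contains v then vv ++ [v] else vv) []))
      (PySem.Dict.empty : PySem.Dict (Int × Int) (List (Int × Int)))).items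
      = (pvGrid 0 p 0 n).map (fun s => (s,
          ([( s.1+1, s.2), (s.1, s.2+1), (s.1-1, s.2), (s.1, s.2-1)] : List (Int × Int)).foldl
            (fun vv v => if (pvGrid 0 p 0 n).contains v then vv ++ [v] else vv) [])) := by
    have := PySem.Dict.items_foldl_insert_fresh (pvGrid 0 p 0 n) (fun s => s)
      (fun s => ([( s.1+1, s.2), (s.1, s.2+1), (s.1-1, s.2), (s.1, s.2-1)] : List (Int × Int)).foldl
        (fun vv v => if (pvGrid 0 p 0 n).contains v then vv ++ [v] else vv) [])
      PySem.Dict.empty (by intro a _; simp) (by simpa using hS)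
    simpa using this
  -- B's initial dict
  set G0 : PySem.Dict (Int × Int) (List (Int × Int)) :=
    (pvGrid 0 p 0 n).foldl (fun G k => G.insert k []) PySem.Dict.empty with hG0def
  have hB0 : G0.items = (pvGrid 0 p 0 n).map (fun s => (s, ([] : List (Int × Int)))) := by
    have := PySem.Dict.items_foldl_insert_fresh (pvGrid 0 p 0 n) (fun s => s)
      (fun _ => ([] : List (Int × Int))) PySem.Dict.empty (by intro a _; simp) (by simpa using hS)
    rw [hG0def]
    simpa using this
  have hK0 : G0.keys = pvGrid 0 p 0 n := by
    simp only [PySem.Dict.keys, hB0, List.map_map]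
    exact (List.map_congr_left fun x _ => rfl).trans (List.map_id _)
  -- sweep key lists are subsets of the vertex set
  have sub1 : ∀ x ∈ pvGrid 0 (p-1) 0 n, x ∈ pvGrid 0 p 0 n := by
    intro x hx; rw [mem_pvGrid] at hx ⊢; omega
  have sub2 : ∀ x ∈ pvGrid 0 p 0 (n-1), x ∈ pvGrid 0 p 0 n := by
    intro x hx; rw [mem_pvGrid] at hx ⊢; omega
  have sub3 : ∀ x ∈ pvGrid 1 p 0 n, x ∈ pvGrid 0 p 0 n := by
    intro x hx; rw [mem_pvGrid] at hx ⊢; omega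
  have sub4 : ∀ x ∈ pvGrid 0 p 1 n, x ∈ pvGrid 0 p 0 n := by
    intro x hx; rw [mem_pvGrid] at hx ⊢; omega
  set B1 := (pvGrid 0 (p-1) 0 n).foldl
    (fun G k => G.modify k [] (fun x => x ++ [(k.1 + 1, k.2)])) G0 with hB1def
  set B2 := (pvGrid 0 p 0 (n-1)).foldl
    (fun G k => G.modify k [] (fun x => x ++ [(k.1, k.2 + 1)])) B1 with hB2def
  set B3 := (pvGrid 1 p 0 n).foldl
    (fun G k => G.modify k [] (fun x => x ++ [(k.1 - 1, k.2)])) B2 with hB3def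
  set B4 := (pvGrid 0 p 1 n).foldl
    (fun G k => G.modify k [] (fun x => x ++ [(k.1, k.2 - 1)])) B3 with hB4def
  have hK1 : B1.keys = pvGrid 0 p 0 n := by
    rw [hB1def, sweep_keys _ _ _ (by rw [hK0]; exact sub1)]; exact hK0
  have hK2 : B2.keys = pvGrid 0 p 0 n := by
    rw [hB2def, sweep_keys _ _ _ (by rw [hK1]; exact sub2)]; exact hK1
  have hK3 : B3.keys = pvGrid 0 p 0 n := by
    rw [hB3def, sweep_keys _ _ _ (by rw [hK2]; exact sub3)]; exact hK2
  have hK4 : B4.keys = pvGrid 0 p 0 n := by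
    rw [hB4def, sweep_keys _ _ _ (by rw [hK3]; exact sub4)]; exact hK3
  have hItems4 : B4.items = (pvGrid 0 p 0 n).map (fun k => (k, B4.getD k [])) := by
    conv_lhs => rw [PySem.Dict.items_eq_map_keys B4 (by rw [hK4]; exact hS) []]
    rw [hK4]
  -- value at a vertex after the four sweeps
  have hVal : ∀ j i : Int, (j, i) ∈ pvGrid 0 p 0 n → B4.getD (j, i) []
      = (if (j, i) ∈ pvGrid 0 (p-1) 0 n then [((j+1 : Int), i)] else [])
          ++ (if (j, i) ∈ pvGrid 0 p 0 (n-1) then [((j : Int), i+1)] else [])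
          ++ (if (j, i) ∈ pvGrid 1 p 0 n then [((j-1 : Int), i)] else [])
          ++ (if (j, i) ∈ pvGrid 0 p 1 n then [((j : Int), i-1)] else []) := by
    intro j i hk
    have h0 : G0.getD (j, i) [] = [] := by
      have hm : ((j, i), ([] : List (Int × Int))) ∈ G0.items := by
        rw [hB0]; exact List.mem_map.2 ⟨(j, i), hk, rfl⟩
      exact PySem.Dict.getD_of_mem_items G0 hm (by rw [hK0]; exact hS) []
    rw [hB4def, sweep_getD _ _ _ _ (nodup_pvGrid 0 p 1 n),
        hB3def, sweep_getD _ _ _ _ (nodup_pvGrid 1 p 0 n),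
        hB2def, sweep_getD _ _ _ _ (nodup_pvGrid 0 p 0 (n-1)),
        hB1def, sweep_getD _ _ _ _ (nodup_pvGrid 0 (p-1) 0 n), h0, List.nil_append]
  rw [hA, hItems4, List.map_map, List.map_map]
  refine List.map_congr_left (fun k hk => ?_)
  obtain ⟨j, i⟩ := k
  have hb := (mem_pvGrid 0 p 0 n (j, i)).1 hk
  simp only [Function.comp_apply]
  rw [hVal j i hk, vv_eq p n j i hb.1 hb.2.1 hb.2.2.1 hb.2.2.2]
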